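-- pv_equiv track=rewrite | github.com/chaechae1212/coding-practice | 프로그래머스/0/120846. 합성수 찾기/합성수 찾기.py | solution
-- ===== SOURCE A (Python) =====
-- def solution(n):
--     number=0
--     for i in range(1,n+1):
--         count=0
--         for j in range(1,i+1):
--             if i%j==0:
--                 count+=1
--         if count == 2:
--             number+=1
--     result=n-number-1
--     return result
-- ===== SOURCE B (Python) =====
-- def solution(n):
--     # Count primes by trial division only up to sqrt(i), with early exit;
--     # composites up to n are then n - primes - 1.
--     primes = 0
--     for i in range(2, n + 1):
--         is_p = True
--         j = 2
--         while j * j <= i: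
--             if i % j == 0:
--                 is_p = False
--                 break
--             j += 1
--         if is_p:
--             primes += 1
--     return n - primes - 1
-- ===== Notes on version B (the rewrite author's own statement) =====
-- stated objective: faster
-- what changed: A counts all divisors 1..i of every i and tests count==2; B tests primality by trial division only up to sqrt(i) with early exit, then returns n - primes - 1.
import Mathlib
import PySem

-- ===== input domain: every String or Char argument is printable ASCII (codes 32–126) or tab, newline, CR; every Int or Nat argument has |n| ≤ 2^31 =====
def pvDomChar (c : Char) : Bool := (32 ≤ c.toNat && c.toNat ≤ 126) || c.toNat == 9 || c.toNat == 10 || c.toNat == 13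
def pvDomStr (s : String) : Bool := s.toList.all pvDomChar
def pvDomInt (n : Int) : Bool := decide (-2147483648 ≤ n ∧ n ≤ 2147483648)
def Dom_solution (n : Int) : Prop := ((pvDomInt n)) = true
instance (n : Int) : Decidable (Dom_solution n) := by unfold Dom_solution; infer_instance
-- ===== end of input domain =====

-- B replaces A's divisor-counting inner loop (all j in 1..i) by trial division only up to
-- sqrt(i) with early exit; both return n - primes - 1.

-- ===== PORT A =====
def solution (n : Int) : Int :=
  let number : Int :=
    (PySem.List.pyRange 1 (n + 1) 1).foldl (fun number i =>
      let count : Int :=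
        (PySem.List.pyRange 1 (i + 1) 1).foldl (fun count j =>
          if PySem.Int.mod i j == 0 then count + 1 else count) 0
      if count == 2 then number + 1 else number) 0
  n - number - 1

-- ===== PORT B =====
-- the 'while j * j <= i' loop of Source B with its early 'break' on a divisor;
-- i comes from range(2, n+1), so i ≥ 2 and the Nat view i.toNat is exact
def isPrimeAux (m : Nat) (j : Nat) : Bool :=
  if h : j * j ≤ m then
    (if m % j == 0 then false else isPrimeAux m (j + 1))
  else true
termination_by m + 1 - j
decreasing_by
  have hj : j ≤ m := by
    rcases Nat.eq_zero_or_pos j with h0 | h0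
    · omega
    · exact le_trans (Nat.le_mul_of_pos_left j h0) h
  omega

def solution_alt (n : Int) : Int :=
  let primes : Int :=
    (PySem.List.pyRange 2 (n + 1) 1).foldl (fun primes i =>
      if isPrimeAux i.toNat 2 then primes + 1 else primes) 0
  n - primes - 1

-- ===== PRECONDITION & SPEC =====
def Spec_solution (n : Int) (out : Int) : Prop := out = solution_alt n
instance (n : Int) (out : Int) : Decidable (Spec_solution n out) := by unfold Spec_solution; infer_instance

-- ===== CLAIM (what is proved, stated in full; the proofs are below) =====
def Claim_equal_solution : Prop := ∀ (n : Int), Dom_solution n → Spec_solution n (solution n)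

-- ===== LEMMAS AND PROOFS =====

-- A's inner loop counts the divisors of i among 1..i
theorem innerA_eq_countP (i : Int) :
    (PySem.List.pyRange 1 (i + 1) 1).foldl (fun count j =>
        if PySem.Int.mod i j == 0 then count + 1 else count) (0 : Int)
      = ((PySem.List.pyRange 1 (i + 1) 1).countP (fun j => PySem.Int.mod i j == 0) : Int) := by
  simpa using PySem.List.foldl_count_if (fun j => PySem.Int.mod i j == 0) (PySem.List.pyRange 1 (i + 1) 1) 0

-- the divisor count over 1..m, in Nat form
theorem countA_nat (m : Nat) :
    (PySem.List.pyRange 1 ((m : Int) + 1) 1).countP (fun j => PySem.Int.mod (m : Int) j == 0)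
      = (List.range m).countP (fun k => decide ((k + 1) ∣ m)) := by
  rw [PySem.List.pyRange_one]
  have h1 : ((m : Int) + 1 - 1).toNat = m := by omega
  rw [h1, List.countP_map]
  refine List.countP_congr (fun k _ => ?_)
  have hpos : (0 : Int) < 1 + (k : Int) := by positivity
  simp only [Function.comp, PySem.Int.mod, beq_iff_eq, decide_eq_true_eq]
  rw [Int.fmod_eq_emod]
  rw [if_pos (Or.inl (le_of_lt hpos)), add_zero, EuclideanDomain.mod_eq_zero]
  have h3 : (1 + (k : Int)) = ((k + 1 : Nat) : Int) := by push_cast; ring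
  rw [h3, Int.natCast_dvd_natCast]

-- bridge a List.countP over range to a Finset card
theorem countP_range_eq_card (p : Nat → Bool) (m : Nat) :
    (List.range m).countP p = ((Finset.range m).filter (fun k => p k = true)).card := by
  induction m with
  | zero => simp
  | succ k ih =>
    rw [List.range_succ, Finset.range_add_one, List.countP_append, Finset.filter_insert]
    by_cases h : p k = true
    · rw [if_pos h, Finset.card_insert_of_notMem (by simp), ← ih]; simp [h]
    · rw [if_neg h, ← ih]; simp [h]

-- k ↦ k+1 is a bijection from the filtered range onto m.divisors
theorem filter_range_card (m : Nat) (hm : 1 ≤ m) :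
    ((Finset.range m).filter (fun k => (k + 1) ∣ m)).card = m.divisors.card := by
  apply Finset.card_nbij' (i := fun k => k + 1) (j := fun d => d - 1)
  · intro a ha
    simp only [Finset.coe_filter, Set.mem_setOf_eq, Finset.mem_range, Finset.mem_coe] at ha ⊢
    exact Nat.mem_divisors.mpr ⟨ha.2, by omega⟩
  · intro d hd
    simp only [Finset.mem_coe] at hd
    obtain ⟨hdvd, h0⟩ := Nat.mem_divisors.mp hd
    have hd1 : 1 ≤ d := Nat.pos_of_mem_divisors hd
    have hdm : d ≤ m := Nat.le_of_dvd (by omega) hdvd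
    simp only [Finset.coe_filter, Set.mem_setOf_eq, Finset.mem_range]
    refine ⟨by omega, ?_⟩
    have h2 : d - 1 + 1 = d := by omega
    rw [h2]; exact hdvd
  · intro a _
    simp only []
    omega
  · intro d hd
    simp only [Finset.mem_coe] at hd
    have hd1 : 1 ≤ d := Nat.pos_of_mem_divisors hd
    simp only []
    omega

-- m has exactly two divisors iff it is prime
theorem divisors_card_two (m : Nat) (hm : 2 ≤ m) : m.divisors.card = 2 ↔ Nat.Prime m := by
  rw [← Nat.insert_self_properDivisors (by omega : m ≠ 0)]
  rw [Finset.card_insert_of_notMem (by simp [Nat.mem_properDivisors])]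
  rw [← Nat.properDivisors_eq_singleton_one_iff_prime]
  constructor
  · intro h
    obtain ⟨a, ha⟩ := Finset.card_eq_one.mp (by omega : m.properDivisors.card = 1)
    have h1 : (1 : ℕ) ∈ m.properDivisors := Nat.one_mem_properDivisors_iff_one_lt.mpr (by omega)
    rw [ha] at h1 ⊢
    simp only [Finset.mem_singleton] at h1
    rw [h1]
  · intro h; rw [h]; simp

theorem divcount_eq_two_iff (m : Nat) (hm : 2 ≤ m) :
    ((List.range m).countP (fun k => decide ((k + 1) ∣ m)) = 2) ↔ Nat.Prime m := by
  rw [countP_range_eq_card]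
  have he : ((Finset.range m).filter (fun k => decide ((k + 1) ∣ m) = true))
      = ((Finset.range m).filter (fun k => (k + 1) ∣ m)) := by
    apply Finset.filter_congr; intro k _; simp
  rw [he, filter_range_card m (by omega), divisors_card_two m hm]

-- B's while-loop returns true iff no divisor d with j ≤ d and d*d ≤ m
theorem isPrimeAux_iff (m j : Nat) :
    isPrimeAux m j = true ↔ ∀ d, j ≤ d → d * d ≤ m → ¬ d ∣ m := by
  rw [isPrimeAux]
  split
  · rename_i h
    by_cases hd : m % j = 0
    · rw [if_pos (by simpa using hd)]
      simp only [Bool.false_eq_true, false_iff]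
      push Not
      exact ⟨j, le_refl j, h, Nat.dvd_of_mod_eq_zero hd⟩
    · rw [if_neg (by simpa using hd), isPrimeAux_iff m (j + 1)]
      constructor
      · intro H d hjd hdm
        rcases Nat.eq_or_lt_of_le hjd with rfl | hlt
        · intro hdvd
          obtain ⟨c, rfl⟩ := hdvd
          exact hd (Nat.mul_mod_right j c)
        · exact H d hlt hdm
      · intro H d hjd hdm
        exact H d (by omega) hdm
  · rename_i h
    simp only [true_iff]
    intro d hjd hdm _
    have : j * j ≤ d * d := Nat.mul_le_mul hjd hjd
    omega
termination_by m + 1 - j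
decreasing_by
  have hj : j ≤ m := by
    rcases Nat.eq_zero_or_pos j with h0 | h0
    · omega
    · exact le_trans (Nat.le_mul_of_pos_left j h0) (by assumption)
  omega

theorem isPrimeAux_two_iff (m : Nat) (hm : 2 ≤ m) :
    isPrimeAux m 2 = true ↔ Nat.Prime m := by
  rw [isPrimeAux_iff, Nat.prime_def_le_sqrt]
  constructor
  · exact fun h => ⟨hm, fun d hd hle => h d hd (Nat.le_sqrt.mp hle)⟩
  · exact fun h d hd hle => h.2 d hd (Nat.le_sqrt.mpr hle)

-- pointwise agreement of the two per-i tests for i ≥ 2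
theorem pointwise (i : Int) (hi : 2 ≤ i) :
    (((PySem.List.pyRange 1 (i + 1) 1).foldl (fun count j =>
        if PySem.Int.mod i j == 0 then count + 1 else count) (0 : Int)) == 2)
      = isPrimeAux i.toNat 2 := by
  have him : ((i.toNat : Int)) = i := Int.toNat_of_nonneg (by omega)
  have hm2 : 2 ≤ i.toNat := by omega
  rw [Bool.eq_iff_iff, beq_iff_eq, innerA_eq_countP, ← him, countA_nat]
  rw [show ((2 : Int)) = (((2 : Nat) : Int)) from rfl, Nat.cast_inj]
  rw [divcount_eq_two_iff i.toNat hm2, ← isPrimeAux_two_iff i.toNat hm2]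
  rw [Int.toNat_natCast]

theorem counts_eq (n : Int) :
    (PySem.List.pyRange 1 (n + 1) 1).foldl (fun number i =>
      if ((PySem.List.pyRange 1 (i + 1) 1).foldl (fun count j =>
            if PySem.Int.mod i j == 0 then count + 1 else count) (0 : Int) == 2)
      then number + 1 else number) (0 : Int)
    = (PySem.List.pyRange 2 (n + 1) 1).foldl (fun primes i =>
        if isPrimeAux i.toNat 2 then primes + 1 else primes) (0 : Int) := by
  by_cases hn : 1 ≤ n
  · rw [PySem.List.pyRange_one_cons (by omega : (1 : Int) < n + 1), List.foldl_cons]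
    have h1 : (if ((PySem.List.pyRange 1 ((1 : Int) + 1) 1).foldl (fun count j =>
          if PySem.Int.mod 1 j == 0 then count + 1 else count) (0 : Int) == 2)
        then (0 : Int) + 1 else (0 : Int)) = 0 := by decide
    rw [h1]
    rw [PySem.List.foldl_count_if, PySem.List.foldl_count_if]
    simp only [zero_add, Nat.cast_inj]
    apply List.countP_congr
    intro i hi
    exact Bool.eq_iff_iff.mp (pointwise i ((PySem.List.mem_pyRange_one.mp hi).1))
  · rw [PySem.List.pyRange_one_eq_nil (by omega : n + 1 ≤ 1),
        PySem.List.pyRange_one_eq_nil (by omega : n + 1 ≤ 2)]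
    rfl

-- ===== VERDICT (by name: the statement is the Claim_ definition above) =====
theorem solution_spec : Claim_equal_solution := by
  intro n _
  unfold Spec_solution solution solution_alt
  simp only []
  congr 1
  congr 1
  exact counts_eq n
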